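-- pv_equiv track=rewrite | github.com/petyo0707070/Owrk | genetic_algorithn.py | get_candle_charesteristic_keys
-- ===== SOURCE A (Python) =====
-- pattern_size = 3
--
-- def get_candle_charesteristic_keys(pattern_size = pattern_size):
--     first = 1
--     candle_charesteristic_keys = []
--     for i in range(2 * pattern_size):
--         if i == 0:
--             candle_charesteristic_keys.append(first)
--         else:
--             if len(candle_charesteristic_keys) % 2 == 0:
--                 first += 2
--                 candle_charesteristic_keys.append(first)
--
--             else:
--                 first += 3
--                 candle_charesteristic_keys.append(first)
--
--     return candle_charesteristic_keys
-- ===== SOURCE B (Python) =====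
-- pattern_size = 3
--
-- def get_candle_charesteristic_keys(pattern_size = pattern_size):
--     # closed form: element j is 1 + 5*(j//2), plus 3 when j is odd
--     return [1 + 5 * (j // 2) + 3 * (j % 2) for j in range(2 * pattern_size)]
-- ===== Notes on version B (the rewrite author's own statement) =====
-- stated objective: simpler
-- what changed: Replaced the stateful loop (running accumulator plus a branch on the parity of the list length) by a closed-form expression 1 + 5*(j//2) + 3*(j%2) computed independently for each index j.
import Mathlib
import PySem

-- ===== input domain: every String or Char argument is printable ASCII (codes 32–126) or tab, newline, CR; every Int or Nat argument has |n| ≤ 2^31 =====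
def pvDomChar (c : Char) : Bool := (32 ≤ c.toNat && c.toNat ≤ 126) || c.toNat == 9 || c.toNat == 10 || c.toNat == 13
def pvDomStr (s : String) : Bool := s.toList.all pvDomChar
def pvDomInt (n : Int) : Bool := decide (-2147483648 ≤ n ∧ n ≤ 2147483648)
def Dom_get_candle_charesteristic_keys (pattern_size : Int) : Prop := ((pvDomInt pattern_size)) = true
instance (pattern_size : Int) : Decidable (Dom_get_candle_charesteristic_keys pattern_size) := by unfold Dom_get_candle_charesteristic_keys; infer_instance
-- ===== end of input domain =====

-- B replaces A's stateful accumulator-plus-parity-branch loop by a closed form per index (objective: simpler).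

-- ===== PORT A =====
-- literal port of A: fold over range(2*pattern_size) carrying (first, list)
def get_candle_charesteristic_keys (pattern_size : Int) : List Int :=
  ((PySem.List.pyRange 0 (2 * pattern_size) 1).foldl
    (fun (st : Int × List Int) i =>
      if i == 0 then (st.1, st.2 ++ [st.1])
      else if st.2.length % 2 == 0 then (st.1 + 2, st.2 ++ [st.1 + 2])
      else (st.1 + 3, st.2 ++ [st.1 + 3]))
    (1, [])).2

-- ===== PORT B =====
-- literal port of B: closed form per index over range(2*pattern_size)
def get_candle_charesteristic_keys_alt (pattern_size : Int) : List Int :=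
  (PySem.List.pyRange 0 (2 * pattern_size) 1).map
    (fun j => 1 + 5 * PySem.Int.floordiv j 2 + 3 * PySem.Int.mod j 2)

-- ===== PRECONDITION & SPEC =====
def Spec_get_candle_charesteristic_keys (pattern_size : Int) (out : List Int) : Prop := out = get_candle_charesteristic_keys_alt pattern_size
instance (pattern_size : Int) (out : List Int) : Decidable (Spec_get_candle_charesteristic_keys pattern_size out) := by unfold Spec_get_candle_charesteristic_keys; infer_instance

-- ===== CLAIM (what is proved, stated in full; the proofs are below) =====
def Claim_equal_get_candle_charesteristic_keys : Prop := ∀ (pattern_size : Int), Dom_get_candle_charesteristic_keys pattern_size → Spec_get_candle_charesteristic_keys pattern_size (get_candle_charesteristic_keys pattern_size)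

-- ===== LEMMAS AND PROOFS =====

-- the closed form, on Nat indices
def cckC (j : Nat) : Int := 1 + 5 * ((j / 2 : Nat) : Int) + 3 * ((j % 2 : Nat) : Int)

-- loop invariant for A's fold: after k steps the state is (cckC (k-1), map cckC (range k))
theorem cck_loop_inv (k : Nat) :
    (((List.range k).map (fun (j : Nat) => (j : Int))).foldl
      (fun (st : Int × List Int) i =>
        if i == 0 then (st.1, st.2 ++ [st.1])
        else if st.2.length % 2 == 0 then (st.1 + 2, st.2 ++ [st.1 + 2])
        else (st.1 + 3, st.2 ++ [st.1 + 3]))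
      (1, [])) = (cckC (k - 1), (List.range k).map cckC) := by
  induction k with
  | zero => simp [cckC]
  | succ k ih =>
    rw [List.range_succ, List.map_append, List.foldl_append, ih]
    simp only [List.map_cons, List.map_nil, List.foldl_cons, List.foldl_nil]
    rcases Nat.eq_zero_or_pos k with hk | hk
    · subst hk; simp [cckC]
    · have hne : ((k : Int) == 0) = false := by
        simp only [beq_eq_false_iff_ne, ne_eq]; exact_mod_cast Nat.pos_iff_ne_zero.mp hk
      rw [hne]
      simp only [Bool.false_eq_true, if_false, List.length_map, List.length_range]
      rcases Nat.even_or_odd k with he | ho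
      · obtain ⟨m, hm⟩ := he
        have h2 : k % 2 = 0 := by omega
        simp only [h2, beq_self_eq_true, if_true]
        have hstep : cckC (k - 1) + 2 = cckC k := by
          simp only [cckC]
          have h1 : (k - 1) / 2 = m - 1 := by omega
          have h1m : (k - 1) % 2 = 1 := by omega
          have h3 : k / 2 = m := by omega
          rw [h1, h1m, h3, h2]
          have : 1 ≤ m := by omega
          push_cast [Nat.cast_sub this]
          ring
        simp only [Nat.add_sub_cancel, List.map_append, List.map_cons, List.map_nil]
        rw [hstep]
      · obtain ⟨m, hm⟩ := ho
        have h2 : k % 2 = 1 := by omega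
        have h2' : (k % 2 == 0) = false := by simp [h2]
        simp only [h2', Bool.false_eq_true, if_false]
        have hstep : cckC (k - 1) + 3 = cckC k := by
          simp only [cckC]
          have h1 : (k - 1) / 2 = m := by omega
          have h1m : (k - 1) % 2 = 0 := by omega
          have h3 : k / 2 = m := by omega
          rw [h1, h1m, h3, h2]
          push_cast
          ring
        simp only [Nat.add_sub_cancel, List.map_append, List.map_cons, List.map_nil]
        rw [hstep]

-- B's per-index closed form on a Nat index equals cckC
theorem cck_alt_eq (j : Nat) :
    1 + 5 * PySem.Int.floordiv (j : Int) 2 + 3 * PySem.Int.mod (j : Int) 2 = cckC j := by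
  have h1 := PySem.Int.floordiv_natCast j 2
  have h2 := PySem.Int.mod_natCast j 2
  simp only [cckC]
  rw [show ((2:Int)) = ((2:Nat):Int) by norm_num] at *
  rw [h1, h2]

-- ===== VERDICT (by name: the statement is the Claim_ definition above) =====
theorem get_candle_charesteristic_keys_spec : Claim_equal_get_candle_charesteristic_keys := by
  intro n _
  unfold Spec_get_candle_charesteristic_keys get_candle_charesteristic_keys get_candle_charesteristic_keys_alt
  rw [PySem.List.pyRange_one]
  simp only [sub_zero, zero_add, List.map_map]
  rw [cck_loop_inv ((2 * n).toNat)]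
  apply List.map_congr_left
  intro j _
  exact (cck_alt_eq j).symm
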